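-- pv_equiv track=rewrite | github.com/carawarner/grasp | python/scripts/vec.py | add_vecs
-- ===== SOURCE A (Python) =====
-- def add_vecs(vectors):
--     """Add 2 or more vectors. Return a vector."""
--     if len(vectors) <= 1:
--         return
--
--     if len(vectors) == 2:
--         vec_a = vectors[0]
--         vec_b = vectors[1]
--         return [vec_a[i] + vec_b[i] for i in range(len(vec_a))]
--
--     #Add first element to the sum of remaining elements
--     return add_vecs([vectors[0], add_vecs(vectors[1:])])
-- ===== SOURCE B (Python) =====
-- def add_vecs(vectors):
--     """Add 2 or more vectors. Return a vector."""
--     if len(vectors) <= 1: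
--         return None
--     acc = vectors[-1]
--     for v in reversed(vectors[:-1]):
--         acc = [v[i] + acc[i] for i in range(len(v))]
--     return acc
-- ===== Notes on version B (the rewrite author's own statement) =====
-- stated objective: simpler
-- what changed: Replaces A's three-case recursion (which re-slices the tail at every level) by a single iterative right-to-left fold over the list, keeping the same right-associative pairwise addition.
import Mathlib
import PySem

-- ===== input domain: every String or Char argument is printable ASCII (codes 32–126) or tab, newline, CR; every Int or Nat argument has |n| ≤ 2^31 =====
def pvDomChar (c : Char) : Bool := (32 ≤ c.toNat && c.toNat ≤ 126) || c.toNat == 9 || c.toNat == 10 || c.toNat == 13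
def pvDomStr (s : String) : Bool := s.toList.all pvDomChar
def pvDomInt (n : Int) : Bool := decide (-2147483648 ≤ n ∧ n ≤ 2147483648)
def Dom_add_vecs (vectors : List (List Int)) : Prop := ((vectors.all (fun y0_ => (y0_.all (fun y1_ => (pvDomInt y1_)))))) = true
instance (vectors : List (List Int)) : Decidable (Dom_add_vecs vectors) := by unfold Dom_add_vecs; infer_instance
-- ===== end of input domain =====

-- B replaces A's three-case recursion by one iterative right-to-left fold over the list,
-- keeping the same right-associative pairwise addition; objective: simpler.

-- ===== PORT A =====
-- [vec_a[i] + vec_b[i] for i in range(len(vec_a))]; none = IndexError on vec_b[i]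
def zipAddPy (va vb : List Int) : Option (List Int) :=
  (PySem.List.pyRange 0 va.length 1).mapM
    (fun i => (PySem.List.pyGet? va i).bind fun x => (PySem.List.pyGet? vb i).map fun y => x + y)

def add_vecs (vectors : List (List Int)) : Option (List Int) :=
  if vectors.length ≤ 1 then none
  else if vectors.length = 2 then
    zipAddPy (PySem.List.pyGetD vectors 0 []) (PySem.List.pyGetD vectors 1 [])
  else
    -- add_vecs([vectors[0], add_vecs(vectors[1:])]); a none (IndexError) propagates
    match add_vecs (PySem.List.slice vectors (some 1) none) with
    | none => none
    | some x => add_vecs [PySem.List.pyGetD vectors 0 [], x]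
termination_by vectors.length
decreasing_by
  · simp only [PySem.List.slice_from_one, List.length_tail]; omega
  · simp only [List.length_cons, List.length_nil]; omega

-- ===== PORT B =====
def add_vecs_alt (vectors : List (List Int)) : Option (List Int) :=
  if vectors.length ≤ 1 then none
  else
    match PySem.List.pyGet? vectors (-1) with
    | none => none
    | some acc0 =>
      (PySem.List.slice vectors none (some (-1))).reverse.foldl
        (fun acc v => acc.bind fun a => zipAddPy v a) (some acc0)

-- ===== PRECONDITION & SPEC =====
-- Pre_ excludes exactly the inputs on which the Python A raises IndexError: two or more
-- vectors whose lengths are not non-decreasing from left to right.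
def Pre_add_vecs (vectors : List (List Int)) : Prop :=
  vectors.length ≤ 1 ∨ List.IsChain (fun a b => a.length ≤ b.length) vectors
instance (vectors : List (List Int)) : Decidable (Pre_add_vecs vectors) := by
  unfold Pre_add_vecs; infer_instance
def pvWitness_add_vecs : List (List Int) := [[1, 2], [3, 4], [5, 6]]

def Spec_add_vecs (vectors : List (List Int)) (out : Option (List Int)) : Prop := out = add_vecs_alt vectors
instance (vectors : List (List Int)) (out : Option (List Int)) : Decidable (Spec_add_vecs vectors out) := by unfold Spec_add_vecs; infer_instance

-- ===== CLAIM (what is proved, stated in full; the proofs are below) =====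
def Claim_equal_add_vecs : Prop := ∀ (vectors : List (List Int)), Dom_add_vecs vectors → Pre_add_vecs vectors → Spec_add_vecs vectors (add_vecs vectors)

-- ===== LEMMAS AND PROOFS =====

-- the common right-associative pairwise sum both ports compute for 2+ vectors
def rfoldSum : List (List Int) → Option (List Int)
  | [] => none
  | [a] => some a
  | a :: b :: rest => (rfoldSum (b :: rest)).bind fun x => zipAddPy a x

theorem addA_eq_rfold : ∀ (n : ℕ) (vectors : List (List Int)),
    vectors.length = n → 2 ≤ n → add_vecs vectors = rfoldSum vectors := by
  intro n
  induction n using Nat.strong_induction_on with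
  | _ n ih =>
    intro vectors hlen h2
    match vectors, hlen with
    | [], hlen => simp at hlen; omega
    | [a], hlen => simp at hlen; omega
    | a :: b :: rest, hlen =>
      unfold add_vecs
      by_cases hr : rest = []
      · subst hr
        simp [rfoldSum, PySem.List.pyGetD]
      · have hrl : 1 ≤ rest.length := by
          cases rest with | nil => simp at hr | cons c cs => simp
        have hlen3 : ¬ (a :: b :: rest).length ≤ 1 := by simp
        have hlen2 : ¬ (a :: b :: rest).length = 2 := by simp; omega
        rw [if_neg hlen3, if_neg hlen2]
        rw [PySem.List.slice_from_one]
        simp only [List.tail_cons]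
        have hih : add_vecs (b :: rest) = rfoldSum (b :: rest) := by
          apply ih (b :: rest).length (by simp at hlen ⊢; omega) _ rfl (by simp; omega)
        rw [hih]
        show _ = rfoldSum (a :: b :: rest)
        rw [rfoldSum]
        cases hrf : rfoldSum (b :: rest) with
        | none => rfl
        | some x =>
          simp only [Option.bind_some]
          unfold add_vecs
          simp [PySem.List.pyGetD]

theorem rfold_concat (init : List (List Int)) (last : List Int) :
    rfoldSum (init ++ [last]) =
      init.foldr (fun v acc => acc.bind fun a => zipAddPy v a) (some last) := by
  induction init with
  | nil => simp [rfoldSum]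
  | cons a init' ih =>
    cases init' with
    | nil => simp [rfoldSum]
    | cons b rest =>
      simp only [List.cons_append, List.foldr_cons] at ih ⊢
      rw [rfoldSum, ih]

theorem addB_eq_rfold (vectors : List (List Int)) (h2 : 2 ≤ vectors.length) :
    add_vecs_alt vectors = rfoldSum vectors := by
  rcases List.eq_nil_or_concat vectors with rfl | ⟨init, last, rfl⟩
  · simp at h2
  · unfold add_vecs_alt
    rw [List.concat_eq_append] at *
    rw [if_neg (by omega)]
    rw [PySem.List.pyGet?_neg_one_append_singleton]
    simp only [PySem.List.slice_to_neg_one, List.dropLast_concat, List.foldl_reverse]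
    rw [rfold_concat]

-- ===== VERDICT (by name: the statement is the Claim_ definition above) =====
theorem add_vecs_spec : Claim_equal_add_vecs := by
  intro vectors _ _
  unfold Spec_add_vecs
  by_cases h : vectors.length ≤ 1
  · unfold add_vecs add_vecs_alt
    rw [if_pos h, if_pos h]
  · rw [addA_eq_rfold vectors.length vectors rfl (by omega),
        addB_eq_rfold vectors (by omega)]
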